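-- pv_equiv track=rewrite | github.com/Erfanh1995/CalendarAnomalyDetection | generate_numosim_user_train_test.py | get_venue_type_from_activities
-- ===== SOURCE A (Python) =====
-- ACTIVITY_TYPE_TO_VENUE = {
--     1: 1,   # "Apartment" -> Home (1)
--     2: 2,   # "Workplace" -> Work (2)
--     3: 2,   # "School" -> Work (2)
--     4: 2,   # "ChildCare" -> Work (2)
--     5: 3,   # "BuyGoods" -> Restaurant (3)
--     6: 3,   # "Services" -> Restaurant (3)
--     7: 3,   # "EatOut" -> Restaurant (3)
--     8: 3,   # "Errands" -> Restaurant (3)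
--     9: 4,   # "Recreation" -> Pub (4)
--     10: 4,  # "Exercise" -> Pub (4)
--     12: 4,  # "HealthCare" -> Pub (4)
--     13: 4,  # "Religious" -> Pub (4)
--     14: 4,  # "SomethingElse" -> Pub (4)
--     # Ignored: 0: Transportation, 11: Visit, 15: DropOff
-- }
--
-- def get_venue_type_from_activities(act_types):
--     """Convert activity types to venue type using the highest ID rule"""
--     if not act_types or act_types == [0] or act_types == [11] or act_types == [15]:
--         return 0  # Ignored types
--
--     # Filter out ignored activity types
--     valid_activities = [act for act in act_types if act in ACTIVITY_TYPE_TO_VENUE]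
--
--     if not valid_activities:
--         return 0  # No valid activities
--
--     # Get venue types for valid activities
--     venue_types = [ACTIVITY_TYPE_TO_VENUE[act] for act in valid_activities]
--
--     # Return the highest venue type ID (highest priority)
--     return max(venue_types)
-- ===== SOURCE B (Python) =====
-- # Reverse priority table: for each venue level (highest first), the activity IDs mapping to it.
-- VENUE_LEVEL_TO_ACTIVITIES = {
--     4: {9, 10, 12, 13, 14},
--     3: {5, 6, 7, 8},
--     2: {2, 3, 4},
--     1: {1},
-- }
--
-- def get_venue_type_from_activities(act_types):
--     """Convert activity types to venue type using the highest ID rule"""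
--     if not act_types:
--         return 0
--     for level in (4, 3, 2, 1):
--         ids = VENUE_LEVEL_TO_ACTIVITIES[level]
--         if any(a in ids for a in act_types):
--             return level
--     return 0
-- ===== Notes on version B (the rewrite author's own statement) =====
-- stated objective: alternative
-- what changed: Replaces filter-map-max over the activity->venue dict by a reverse priority table indexed by venue level, scanning levels 4..1 and returning the first level whose ID set intersects the input (short-circuits at the highest priority).
import Mathlib
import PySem

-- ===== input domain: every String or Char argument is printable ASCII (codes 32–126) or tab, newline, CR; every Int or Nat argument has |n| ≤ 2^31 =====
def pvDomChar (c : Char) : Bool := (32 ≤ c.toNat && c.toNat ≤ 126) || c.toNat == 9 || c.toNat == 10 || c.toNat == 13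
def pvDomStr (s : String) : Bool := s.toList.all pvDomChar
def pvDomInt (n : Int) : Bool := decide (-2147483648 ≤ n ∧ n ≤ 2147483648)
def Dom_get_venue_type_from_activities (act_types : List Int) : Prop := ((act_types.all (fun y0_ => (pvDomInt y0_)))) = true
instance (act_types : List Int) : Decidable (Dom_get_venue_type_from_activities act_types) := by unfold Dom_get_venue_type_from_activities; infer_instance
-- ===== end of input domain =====

-- B replaces A's filter/map/max over the activity->venue dict by a reverse priority
-- table scanned from venue level 4 down to 1 (alternative decomposition, same cost).

-- ===== PORT A =====
def ACTIVITY_TYPE_TO_VENUE : PySem.Dict Int Int :=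
  PySem.Dict.ofList [(1,1),(2,2),(3,2),(4,2),(5,3),(6,3),(7,3),(8,3),(9,4),(10,4),(12,4),(13,4),(14,4)]

def get_venue_type_from_activities (act_types : List Int) : Int :=
  if act_types = [] ∨ act_types = [0] ∨ act_types = [11] ∨ act_types = [15] then 0
  else
    let valid_activities := act_types.filter (fun act => ACTIVITY_TYPE_TO_VENUE.contains act)
    if valid_activities = [] then 0
    else
      let venue_types := valid_activities.map (fun act => (ACTIVITY_TYPE_TO_VENUE.get? act).getD 0)
      -- max(venue_types): guarded nonempty above, so max? is always some here
      match PySem.List.max? venue_types (fun y => y) with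
      | some m => m
      | none => 0

-- ===== PORT B =====
def VENUE_LEVEL_TO_ACTIVITIES : PySem.Dict Int (PySem.Set Int) :=
  PySem.Dict.ofList [(4, PySem.Set.ofList [9,10,12,13,14]),
                     (3, PySem.Set.ofList [5,6,7,8]),
                     (2, PySem.Set.ofList [2,3,4]),
                     (1, PySem.Set.ofList [1])]

-- "for level in (4, 3, 2, 1): … return level" with its "return 0" fall-through
def pvAltLoop (act_types : List Int) : List Int → Int
  | [] => 0
  | level :: rest =>
    let ids := (VENUE_LEVEL_TO_ACTIVITIES.get? level).getD PySem.Set.empty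
    if act_types.any (fun a => PySem.Set.contains ids a) then level else pvAltLoop act_types rest

def get_venue_type_from_activities_alt (act_types : List Int) : Int :=
  if act_types = [] then 0
  else pvAltLoop act_types [4, 3, 2, 1]

-- ===== PRECONDITION & SPEC =====
def Spec_get_venue_type_from_activities (act_types : List Int) (out : Int) : Prop := out = get_venue_type_from_activities_alt act_types
instance (act_types : List Int) (out : Int) : Decidable (Spec_get_venue_type_from_activities act_types out) := by unfold Spec_get_venue_type_from_activities; infer_instance

-- ===== CLAIM (what is proved, stated in full; the proofs are below) =====
def Claim_equal_get_venue_type_from_activities : Prop := ∀ (act_types : List Int), Dom_get_venue_type_from_activities act_types → Spec_get_venue_type_from_activities act_types (get_venue_type_from_activities act_types)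

-- ===== LEMMAS AND PROOFS =====

-- the venue level of one activity id (0 = ignored): the common reference point
def pvLvl (a : Int) : Int := (ACTIVITY_TYPE_TO_VENUE.get? a).getD 0

lemma pvLvl_cases (a : Int) :
    pvLvl a = if a = 1 then 1 else if a = 2 ∨ a = 3 ∨ a = 4 then 2
      else if a = 5 ∨ a = 6 ∨ a = 7 ∨ a = 8 then 3
      else if a = 9 ∨ a = 10 ∨ a = 12 ∨ a = 13 ∨ a = 14 then 4 else 0 := by
  split_ifs with h1 h2 h3 h4
  · subst h1; decide
  · rcases h2 with h|h|h <;> subst h <;> decide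
  · rcases h3 with h|h|h|h <;> subst h <;> decide
  · rcases h4 with h|h|h|h|h <;> subst h <;> decide
  · simp only [pvLvl, ACTIVITY_TYPE_TO_VENUE, PySem.Dict.ofList, PySem.Dict.get?]
    rw [List.find?_eq_none.mpr]
    · rfl
    · intro p hp; fin_cases hp <;> simp <;> omega

lemma pvContains_iff (a : Int) :
    ACTIVITY_TYPE_TO_VENUE.contains a = true ↔ pvLvl a ≠ 0 := by
  rw [PySem.Dict.contains_eq_isSome_get?]
  rw [pvLvl_cases]
  split_ifs with h1 h2 h3 h4
  · subst h1; decide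
  · rcases h2 with h|h|h <;> subst h <;> decide
  · rcases h3 with h|h|h|h <;> subst h <;> decide
  · rcases h4 with h|h|h|h|h <;> subst h <;> decide
  · simp only [ACTIVITY_TYPE_TO_VENUE, PySem.Dict.ofList, PySem.Dict.get?]
    rw [List.find?_eq_none.mpr]
    · simp
    · intro p hp; fin_cases hp <;> simp <;> omega

lemma pvIds4 : (VENUE_LEVEL_TO_ACTIVITIES.get? 4).getD PySem.Set.empty = ([9,10,12,13,14] : List Int) := by decide
lemma pvIds3 : (VENUE_LEVEL_TO_ACTIVITIES.get? 3).getD PySem.Set.empty = ([5,6,7,8] : List Int) := by decide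
lemma pvIds2 : (VENUE_LEVEL_TO_ACTIVITIES.get? 2).getD PySem.Set.empty = ([2,3,4] : List Int) := by decide
lemma pvIds1 : (VENUE_LEVEL_TO_ACTIVITIES.get? 1).getD PySem.Set.empty = ([1] : List Int) := by decide

-- membership in a level's id-set is exactly "pvLvl = that level"
lemma pvIds_iff (l a : Int) (hl : l = 1 ∨ l = 2 ∨ l = 3 ∨ l = 4) :
    (PySem.Set.contains ((VENUE_LEVEL_TO_ACTIVITIES.get? l).getD PySem.Set.empty) a = true) ↔ pvLvl a = l := by
  rw [pvLvl_cases]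
  rcases hl with h | h | h | h <;> subst h
  · rw [pvIds1]; simp; split_ifs <;> omega
  · rw [pvIds2]; simp; constructor
    · intro h; split_ifs <;> omega
    · intro h; split_ifs at h <;> omega
  · rw [pvIds3]; simp; constructor
    · intro h; split_ifs <;> omega
    · intro h; split_ifs at h <;> omega
  · rw [pvIds4]; simp; constructor
    · intro h; split_ifs <;> omega
    · intro h; split_ifs at h <;> omega

-- reference value: the highest venue level present in the list (0 if none)
def pvG (acts : List Int) : Int := acts.foldr (fun a acc => max (pvLvl a) acc) 0

lemma pvLvl_mem (a : Int) : pvLvl a = 0 ∨ pvLvl a = 1 ∨ pvLvl a = 2 ∨ pvLvl a = 3 ∨ pvLvl a = 4 := by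
  rw [pvLvl_cases]; split_ifs <;> omega

lemma pvG_nonneg (acts : List Int) : 0 ≤ pvG acts := by
  induction acts with
  | nil => simp [pvG]
  | cons a t ih => simp only [pvG, List.foldr_cons] at *; omega

lemma pvG_ub (acts : List Int) : ∀ a ∈ acts, pvLvl a ≤ pvG acts := by
  induction acts with
  | nil => simp
  | cons a t ih =>
    intro b hb
    simp only [pvG, List.foldr_cons]
    rcases List.mem_cons.mp hb with h | h
    · subst h; exact le_max_left _ _
    · exact le_trans (ih b h) (le_max_right _ _)

lemma pvG_attained (acts : List Int) : pvG acts = 0 ∨ ∃ a ∈ acts, pvLvl a = pvG acts := by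
  induction acts with
  | nil => left; rfl
  | cons a t ih =>
    simp only [pvG, List.foldr_cons] at *
    rcases le_total (pvLvl a) (t.foldr (fun a acc => max (pvLvl a) acc) 0) with h | h
    · rw [max_eq_right h]
      rcases ih with h0 | ⟨b, hb, he⟩
      · left; exact h0
      · right; exact ⟨b, List.mem_cons_of_mem _ hb, he⟩
    · rw [max_eq_left h]
      right; exact ⟨a, List.mem_cons_self, rfl⟩

lemma pvG_zero (acts : List Int) (h : ∀ a ∈ acts, pvLvl a = 0) : pvG acts = 0 := by
  induction acts with
  | nil => rfl
  | cons a t ih =>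
    simp only [pvG, List.foldr_cons] at *
    rw [h a (List.mem_cons_self), ih (fun b hb => h b (List.mem_cons_of_mem _ hb))]
    simp

-- B computes pvG
lemma alt_eq_pvG (acts : List Int) : get_venue_type_from_activities_alt acts = pvG acts := by
  by_cases hnil : acts = []
  · subst hnil; rfl
  · rw [get_venue_type_from_activities_alt, if_neg hnil]
    have hub := pvG_ub acts
    have hat := pvG_attained acts
    have hnn := pvG_nonneg acts
    have hany : ∀ l : Int, (l = 1 ∨ l = 2 ∨ l = 3 ∨ l = 4) →
        ((acts.any (fun a => PySem.Set.contains ((VENUE_LEVEL_TO_ACTIVITIES.get? l).getD PySem.Set.empty) a) = true) ↔ ∃ a ∈ acts, pvLvl a = l) := by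
      intro l hl
      simp only [List.any_eq_true]
      constructor
      · rintro ⟨a, ha, hc⟩; exact ⟨a, ha, (pvIds_iff l a hl).mp hc⟩
      · rintro ⟨a, ha, hc⟩; exact ⟨a, ha, (pvIds_iff l a hl).mpr hc⟩
    simp only [pvAltLoop]
    by_cases e4 : ∃ a ∈ acts, pvLvl a = 4
    · rw [if_pos ((hany 4 (by norm_num)).mpr e4)]
      obtain ⟨a, ha, he⟩ := e4
      have h1 := hub a ha
      rcases hat with h0 | ⟨b, hb, hbe⟩
      · omega
      · have := pvLvl_mem b; omega
    · have n4 : (acts.any (fun a => PySem.Set.contains ((VENUE_LEVEL_TO_ACTIVITIES.get? 4).getD PySem.Set.empty) a)) = false :=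
        Bool.eq_false_iff.mpr (fun h => e4 ((hany 4 (by norm_num)).mp h))
      rw [n4, if_neg (by simp)]
      have g4 : pvG acts ≠ 4 := by
        intro h; rcases hat with h0 | ⟨b, hb, hbe⟩
        · omega
        · exact e4 ⟨b, hb, by omega⟩
      by_cases e3 : ∃ a ∈ acts, pvLvl a = 3
      · rw [if_pos ((hany 3 (by norm_num)).mpr e3)]
        obtain ⟨a, ha, he⟩ := e3
        have h1 := hub a ha
        rcases hat with h0 | ⟨b, hb, hbe⟩
        · omega
        · have := pvLvl_mem b; omega
      · have n3 : (acts.any (fun a => PySem.Set.contains ((VENUE_LEVEL_TO_ACTIVITIES.get? 3).getD PySem.Set.empty) a)) = false :=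
          Bool.eq_false_iff.mpr (fun h => e3 ((hany 3 (by norm_num)).mp h))
        rw [n3, if_neg (by simp)]
        have g3 : pvG acts ≠ 3 := by
          intro h; rcases hat with h0 | ⟨b, hb, hbe⟩
          · omega
          · exact e3 ⟨b, hb, by omega⟩
        by_cases e2 : ∃ a ∈ acts, pvLvl a = 2
        · rw [if_pos ((hany 2 (by norm_num)).mpr e2)]
          obtain ⟨a, ha, he⟩ := e2
          have h1 := hub a ha
          rcases hat with h0 | ⟨b, hb, hbe⟩
          · omega
          · have := pvLvl_mem b; omega
        · have n2 : (acts.any (fun a => PySem.Set.contains ((VENUE_LEVEL_TO_ACTIVITIES.get? 2).getD PySem.Set.empty) a)) = false :=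
            Bool.eq_false_iff.mpr (fun h => e2 ((hany 2 (by norm_num)).mp h))
          rw [n2, if_neg (by simp)]
          have g2 : pvG acts ≠ 2 := by
            intro h; rcases hat with h0 | ⟨b, hb, hbe⟩
            · omega
            · exact e2 ⟨b, hb, by omega⟩
          by_cases e1 : ∃ a ∈ acts, pvLvl a = 1
          · rw [if_pos ((hany 1 (by norm_num)).mpr e1)]
            obtain ⟨a, ha, he⟩ := e1
            have h1 := hub a ha
            rcases hat with h0 | ⟨b, hb, hbe⟩
            · omega
            · have := pvLvl_mem b; omega
          · have n1 : (acts.any (fun a => PySem.Set.contains ((VENUE_LEVEL_TO_ACTIVITIES.get? 1).getD PySem.Set.empty) a)) = false :=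
              Bool.eq_false_iff.mpr (fun h => e1 ((hany 1 (by norm_num)).mp h))
            rw [n1, if_neg (by simp)]
            symm
            apply pvG_zero
            intro a ha
            rcases pvLvl_mem a with h|h|h|h|h
            · exact h
            · exact absurd ⟨a, ha, h⟩ e1
            · exact absurd ⟨a, ha, h⟩ e2
            · exact absurd ⟨a, ha, h⟩ e3
            · exact absurd ⟨a, ha, h⟩ e4

-- A computes pvG
lemma a_eq_pvG (acts : List Int) : get_venue_type_from_activities acts = pvG acts := by
  simp only [get_venue_type_from_activities]
  split_ifs with hg hv
  · rcases hg with h|h|h|h <;> subst h <;> decide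
  · -- no valid activities: every level is 0
    symm; apply pvG_zero
    intro a ha
    by_contra h0
    have hc : ACTIVITY_TYPE_TO_VENUE.contains a = true := (pvContains_iff a).mpr h0
    have : a ∈ acts.filter (fun act => ACTIVITY_TYPE_TO_VENUE.contains act) := List.mem_filter.mpr ⟨ha, hc⟩
    rw [hv] at this
    exact absurd this (List.not_mem_nil)
  · set valid := acts.filter (fun act => ACTIVITY_TYPE_TO_VENUE.contains act) with hval
    have hne : (valid.map (fun act => (ACTIVITY_TYPE_TO_VENUE.get? act).getD 0)) ≠ [] := by
      simp only [ne_eq, List.map_eq_nil_iff]; exact hv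
    cases hm : PySem.List.max? (valid.map (fun act => (ACTIVITY_TYPE_TO_VENUE.get? act).getD 0)) (fun y => y) with
    | none => exact absurd ((PySem.List.max?_eq_none_iff _ _).mp hm) hne
    | some m =>
      simp only []
      have hmem := PySem.List.max?_mem hm
      have hmax := PySem.List.max?_isMax hm
      obtain ⟨a0, ha0, he0⟩ := List.mem_map.mp hmem
      have ha0' := List.mem_filter.mp ha0
      have hl0 : pvLvl a0 ≠ 0 := (pvContains_iff a0).mp ha0'.2
      have hub := pvG_ub acts a0 ha0'.1
      rcases pvG_attained acts with h0 | ⟨b, hb, hbe⟩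
      · have he0' : pvLvl a0 = m := he0; have := pvLvl_mem a0; omega
      · by_cases hb0 : pvLvl b = 0
        · have he0' : pvLvl a0 = m := he0; have := pvLvl_mem a0; omega
        · have hcb : ACTIVITY_TYPE_TO_VENUE.contains b = true := (pvContains_iff b).mpr hb0
          have hbval : b ∈ valid := List.mem_filter.mpr ⟨hb, hcb⟩
          have hbin : pvLvl b ∈ valid.map (fun act => (ACTIVITY_TYPE_TO_VENUE.get? act).getD 0) :=
            List.mem_map.mpr ⟨b, hbval, rfl⟩
          have := hmax _ hbin
          have he0' : pvLvl a0 = m := he0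
          have hble : pvLvl b ≤ m := this
          omega

-- ===== VERDICT (by name: the statement is the Claim_ definition above) =====
theorem get_venue_type_from_activities_spec : Claim_equal_get_venue_type_from_activities := by
  intro acts _
  unfold Spec_get_venue_type_from_activities
  rw [a_eq_pvG, alt_eq_pvG]
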